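-- pv_equiv track=rewrite | github.com/417liangjunjun/financial_NER | preprocessor/training_data_generator.py | find_entity_index
-- ===== SOURCE A (Python) =====
-- def find_entity_index(text, entity_list):
--     answer = []
--     entity_list.sort(key=lambda x: -len(x))
--     text_flag = [0] * len(text)
--     for entity in entity_list:
--         if not entity:
--             continue
--         start_index = 0
--         temp_text = text
--         while (temp_text.find(entity) >= 0):
--             if not text_flag[temp_text.find(entity) + start_index]:
--                 answer.append((entity, temp_text.find(entity) + start_index))
--             for i in range(temp_text.find(entity) + start_index,
--                            temp_text.find(entity) + start_index + len(entity)):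
--                 text_flag[i] = 1
--             start_index += temp_text.find(entity) + len(entity)
--             temp_text = temp_text[temp_text.find(entity) + len(entity):]
--     return answer
-- ===== SOURCE B (Python) =====
-- def find_entity_index(text, entity_list):
--     entity_list.sort(key=lambda x: -len(x))
--     # pass 1: locate the non-overlapping occurrences of each entity, flags not involved
--     occurrences = []
--     for entity in entity_list:
--         if entity:
--             pos = text.find(entity, 0)
--             while pos >= 0:
--                 occurrences.append((entity, pos))
--                 pos = text.find(entity, pos + len(entity))
--     # pass 2: walk the occurrence table, record starts not yet covered, mark spans
--     answer = []
--     text_flag = [0] * len(text)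
--     for entity, start in occurrences:
--         if not text_flag[start]:
--             answer.append((entity, start))
--         for i in range(start, start + len(entity)):
--             text_flag[i] = 1
--     return answer
-- ===== Notes on version B (the rewrite author's own statement) =====
-- stated objective: alternative
-- what changed: A interleaves flag checking with a scan that repeatedly slices the text (temp_text = temp_text[...:]); B is split into two independent passes: pass 1 builds an occurrence table with str.find(entity, pos) start offsets and no slicing, pass 2 folds the table through the flag array to produce the answer.
import Mathlib
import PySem

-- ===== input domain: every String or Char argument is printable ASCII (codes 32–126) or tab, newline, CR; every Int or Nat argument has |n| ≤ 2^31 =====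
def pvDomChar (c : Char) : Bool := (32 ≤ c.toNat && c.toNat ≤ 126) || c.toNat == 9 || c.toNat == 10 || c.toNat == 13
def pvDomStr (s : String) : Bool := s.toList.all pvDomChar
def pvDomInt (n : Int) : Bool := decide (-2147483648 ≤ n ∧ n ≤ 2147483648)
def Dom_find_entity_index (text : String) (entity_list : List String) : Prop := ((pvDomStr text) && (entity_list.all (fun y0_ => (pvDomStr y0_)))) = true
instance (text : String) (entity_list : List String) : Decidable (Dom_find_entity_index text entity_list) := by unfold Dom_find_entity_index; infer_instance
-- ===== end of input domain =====

-- B splits A's interleaved scan-and-flag loop into two passes (occurrence table, then flag fold)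
-- and scans with find(entity, pos) instead of repeated slicing; return-value equivalence only
-- (both Pythons sort entity_list in place, which the caller can observe).

-- ===== PORT A =====
-- for i in range(start, start + len): text_flag[i] = 1   (shared inner loop of both Pythons)
def pvSetFlags (flags : List Bool) (start len : Nat) : List Bool :=
  (List.range' start len).foldl (fun fl i => fl.set i true) flags

-- the 'while temp_text.find(entity) >= 0' loop of A; fuel is a totality guard only
-- (callers pass len(text)+1, never exhausted: each iteration consumes ≥ 1 char of temp)
def pvAWhile (fuel : Nat) (entity : String) (answer : List (String × Int)) (flags : List Bool)
    (si : Nat) (temp : List Char) : List (String × Int) × List Bool :=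
  match fuel with
  | 0 => (answer, flags)
  | fuel + 1 =>
    let f := PySem.Chars.find temp entity.toList
    if h : 0 ≤ f ∧ entity.toList ≠ [] then
      let idx := f.toNat + si
      let answer' := if flags.getD idx false then answer else answer ++ [(entity, (idx : Int))]
      let flags' := pvSetFlags flags idx entity.toList.length
      pvAWhile fuel entity answer' flags' (si + f.toNat + entity.toList.length)
        (temp.drop (f.toNat + entity.toList.length))
    else (answer, flags)

def find_entity_index (text : String) (entity_list : List String) : List (String × Int) :=
  let sortedL := PySem.List.sorted entity_list (fun x => -(PySem.Str.len x)) false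
  let flags0 := List.replicate text.toList.length false
  (sortedL.foldl (fun st entity =>
      if entity = "" then st
      else pvAWhile (text.toList.length + 1) entity st.1 st.2 0 text.toList) ([], flags0)).1

-- ===== PORT B =====
-- pass 1 inner loop of B: the non-overlapping occurrence starts of ec in tl from pos on;
-- fuel is a totality guard only (the found position strictly advances each iteration)
def pvBScan (fuel : Nat) (tl ec : List Char) (pos : Nat) : List Int :=
  match fuel with
  | 0 => []
  | fuel + 1 =>
    let f := PySem.Chars.findFrom tl ec (pos : Int) none
    if h : 0 ≤ f ∧ ec ≠ [] then f :: pvBScan fuel tl ec (f.toNat + ec.length) else []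

-- pass 2 step of B
def pvBStep (st : List (String × Int) × List Bool) (occ : String × Int) :
    List (String × Int) × List Bool :=
  let idx := occ.2.toNat
  ((if st.2.getD idx false then st.1 else st.1 ++ [occ]),
    pvSetFlags st.2 idx occ.1.toList.length)

def find_entity_index_alt (text : String) (entity_list : List String) : List (String × Int) :=
  let sortedL := PySem.List.sorted entity_list (fun x => -(PySem.Str.len x)) false
  let occs := sortedL.flatMap (fun e =>
      if e = "" then [] else (pvBScan (text.toList.length + 1) text.toList e.toList 0).map (fun p => (e, p)))
  (occs.foldl pvBStep ([], List.replicate text.toList.length false)).1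

-- ===== PRECONDITION & SPEC =====
def Spec_find_entity_index (text : String) (entity_list : List String) (out : List (String × Int)) : Prop := out = find_entity_index_alt text entity_list
instance (text : String) (entity_list : List String) (out : List (String × Int)) : Decidable (Spec_find_entity_index text entity_list out) := by unfold Spec_find_entity_index; infer_instance

-- ===== CLAIM (what is proved, stated in full; the proofs are below) =====
def Claim_equal_find_entity_index : Prop := ∀ (text : String) (entity_list : List String), Dom_find_entity_index text entity_list → Spec_find_entity_index text entity_list (find_entity_index text entity_list)

-- ===== LEMMAS AND PROOFS =====

-- core: with enough fuel, A's while loop from temp = drop si equals folding B's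
-- occurrence list for this entity
theorem pvAWhile_eq (tl : List Char) (entity : String) (hne : entity.toList ≠ []) :
    ∀ (k si : Nat), tl.length + 1 - si ≤ k → si ≤ tl.length →
    ∀ (ans : List (String × Int)) (flags : List Bool),
    pvAWhile k entity ans flags si (tl.drop si)
      = ((pvBScan k tl entity.toList si).map (fun p => (entity, p))).foldl pvBStep (ans, flags) := by
  intro k
  induction k with
  | zero => intro si hk hsi ans flags; omega
  | succ k ih =>
    intro si hk hsi ans flags
    simp only [pvAWhile, pvBScan]
    have hF := PySem.Chars.findFrom_natCast tl entity.toList si hsi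
    by_cases hinf : entity.toList <:+: tl.drop si
    · -- found
      have hf0 : 0 ≤ PySem.Chars.find (tl.drop si) entity.toList :=
        (PySem.Chars.find_nonneg_iff _ _).2 hinf
      set f := PySem.Chars.find (tl.drop si) entity.toList with hfdef
      have hfne : f ≠ -1 := by omega
      have hFval : PySem.Chars.findFrom tl entity.toList (si : Int) none = si + f := by
        rw [hF, if_neg hfne]
      have hlen : 1 ≤ entity.toList.length := List.length_pos_of_ne_nil hne
      have hsp := PySem.Chars.findFrom_natCast_spec tl entity.toList si hsi (by omega)
      have hfit : (si + f).toNat + entity.toList.length ≤ tl.length := by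
        have h1 := hsp.2.1.length_le
        rw [hFval] at h1
        simp only [List.length_drop] at h1
        omega
      rw [dif_pos ⟨hf0, hne⟩, dif_pos (by rw [hFval]; exact ⟨by omega, hne⟩)]
      simp only [List.map_cons, List.foldl_cons]
      have htoNat : (PySem.Chars.findFrom tl entity.toList (si : Int) none).toNat
          = f.toNat + si := by rw [hFval]; omega
      have hstep : pvBStep (ans, flags) (entity, PySem.Chars.findFrom tl entity.toList (si : Int) none)
          = ((if flags.getD (f.toNat + si) false then ans else ans ++ [(entity, ((f.toNat + si : Nat) : Int))]),
             pvSetFlags flags (f.toNat + si) entity.toList.length) := by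
        have hcast : ((si : Int) + f) = ((f.toNat + si : Nat) : Int) := by omega
        simp only [pvBStep, hFval, hcast, Int.toNat_natCast]
      rw [hstep]
      have hdd : (tl.drop si).drop (f.toNat + entity.toList.length)
          = tl.drop (si + f.toNat + entity.toList.length) := by
        rw [List.drop_drop]; ring_nf
      have harg : (PySem.Chars.findFrom tl entity.toList (si : Int) none).toNat + entity.toList.length
          = si + f.toNat + entity.toList.length := by omega
      rw [hdd, harg]
      exact ih (si + f.toNat + entity.toList.length) (by omega) (by omega) _ _
    · -- not found
      have hf1 : PySem.Chars.find (tl.drop si) entity.toList = -1 :=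
        (PySem.Chars.find_eq_neg_one_iff _ _).2 hinf
      have hFval : PySem.Chars.findFrom tl entity.toList (si : Int) none = -1 := by
        rw [hF, if_pos hf1]
      rw [dif_neg (by rw [hf1]; simp), dif_neg (by rw [hFval]; simp)]
      simp

theorem find_entity_index_eq (text : String) (entity_list : List String) :
    find_entity_index text entity_list = find_entity_index_alt text entity_list := by
  simp only [find_entity_index, find_entity_index_alt]
  have main : ∀ (l : List String) (st : List (String × Int) × List Bool),
      l.foldl (fun st entity => if entity = "" then st
          else pvAWhile (text.toList.length + 1) entity st.1 st.2 0 text.toList) st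
      = (l.flatMap (fun e => if e = "" then []
            else (pvBScan (text.toList.length + 1) text.toList e.toList 0).map (fun p => (e, p)))).foldl pvBStep st := by
    intro l
    induction l with
    | nil => intro st; simp
    | cons a l ihl =>
      intro st
      simp only [List.foldl_cons, List.flatMap_cons, List.foldl_append]
      by_cases ha : a = ""
      · simp only [ha, if_true]
        simpa using ihl st
      · rw [if_neg ha, if_neg ha, ihl]
        congr 1
        have hne : a.toList ≠ [] := by simpa using ha
        have := pvAWhile_eq text.toList a hne (text.toList.length + 1) 0
          (by omega) (by omega) st.1 st.2
        simpa using this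
  rw [main]

-- ===== VERDICT (by name: the statement is the Claim_ definition above) =====
theorem find_entity_index_spec : Claim_equal_find_entity_index := by
  intro text el _
  unfold Spec_find_entity_index
  exact find_entity_index_eq text el
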